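-- pv_equiv track=rewrite | github.com/nickchen111/Leetcode | Dynamic_Programming/3628. Maximum Number of Subsequences After One Inserting.py | calcInsertC
-- ===== SOURCE A (Python) =====
-- def calcInsertC(s:str) -> int:
--     t = s.count('T')
--     l = ans = 0
--     for ch in s:
--         if ch == 'L':
--             l += 1
--         elif ch == 'T':
--             t -= 1
--         ans = max(ans, l * t)
--     return ans
-- ===== SOURCE B (Python) =====
-- def calcInsertC(s: str) -> int:
--     n = len(s)
--     suffixT = [0] * n
--     cnt = 0
--     for i in range(n - 1, -1, -1):
--         suffixT[i] = cnt
--         if s[i] == 'T':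
--             cnt += 1
--     ans = 0
--     l = 0
--     for i in range(n):
--         if s[i] == 'L':
--             l += 1
--         if l * suffixT[i] > ans:
--             ans = l * suffixT[i]
--     return ans
-- ===== Notes on version B (the rewrite author's own statement) =====
-- stated objective: alternative
-- what changed: Replaces A's single pass with a live total-T counter decremented in flight by a precomputed right-to-left suffix-T table consumed by a separate forward pass that only tracks the L prefix count.
import Mathlib
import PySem

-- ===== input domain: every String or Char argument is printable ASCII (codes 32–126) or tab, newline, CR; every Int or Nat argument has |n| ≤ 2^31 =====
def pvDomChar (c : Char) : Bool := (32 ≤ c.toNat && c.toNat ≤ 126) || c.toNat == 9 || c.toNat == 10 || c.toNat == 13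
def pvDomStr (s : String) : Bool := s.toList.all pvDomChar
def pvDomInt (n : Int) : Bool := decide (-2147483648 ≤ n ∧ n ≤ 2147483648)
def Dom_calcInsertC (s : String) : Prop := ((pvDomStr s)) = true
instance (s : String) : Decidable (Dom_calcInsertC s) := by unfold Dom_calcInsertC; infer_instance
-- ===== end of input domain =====

-- B replaces A's live total-T counter by a precomputed suffix-T table consumed in a separate forward pass (alternative decomposition, same O(n)).


-- ===== PORT A =====
-- the for-loop of A: state (t, l, ans), branches in source order
def pvA_loop : Int → Int → Int → List Char → Int
  | _, _, ans, [] => ans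
  | t, l, ans, ch :: rest =>
    if ch = 'L' then pvA_loop t (l + 1) (max ans ((l + 1) * t)) rest
    else if ch = 'T' then pvA_loop (t - 1) l (max ans (l * (t - 1))) rest
    else pvA_loop t l (max ans (l * t)) rest

def calcInsertC (s : String) : Int :=
  pvA_loop (PySem.Str.count s "T" : Int) 0 0 s.toList

-- ===== PORT B =====
-- right-to-left pass: returns (suffixT table, running T counter)
def pvSuffix : List Char → List Int × Int
  | [] => ([], 0)
  | c :: rest =>
    let p := pvSuffix rest
    (p.2 :: p.1, if c = 'T' then p.2 + 1 else p.2)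

-- forward pass over (char, suffixT[i]) pairs, tracking l and ans
def pvB_loop : Int → Int → List (Char × Int) → Int
  | _, ans, [] => ans
  | l, ans, (c, t) :: rest =>
    let l' := if c = 'L' then l + 1 else l
    pvB_loop l' (if l' * t > ans then l' * t else ans) rest

def calcInsertC_alt (s : String) : Int :=
  pvB_loop 0 0 (s.toList.zip (pvSuffix s.toList).1)

-- ===== PRECONDITION & SPEC =====
def Spec_calcInsertC (s : String) (out : Int) : Prop := out = calcInsertC_alt s
instance (s : String) (out : Int) : Decidable (Spec_calcInsertC s out) := by unfold Spec_calcInsertC; infer_instance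

-- ===== CLAIM (what is proved, stated in full; the proofs are below) =====
def Claim_equal_calcInsertC : Prop := ∀ (s : String), Dom_calcInsertC s → Spec_calcInsertC s (calcInsertC s)

-- ===== LEMMAS AND PROOFS =====

-- the running counter of B's backward pass is the T-count of the list
theorem pvSuffix_snd (cs : List Char) : (pvSuffix cs).2 = (cs.count 'T' : Int) := by
  induction cs with
  | nil => simp [pvSuffix]
  | cons c rest ih =>
    simp only [pvSuffix, List.count_cons, ih]
    by_cases h : c = 'T' <;> simp [h, beq_iff_eq]

-- ans = max(ans, x) written as Python's max equals B's if-update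
theorem max_as_if (ans x : Int) : max ans x = if x > ans then x else ans := by
  rw [max_def]; split_ifs <;> omega

-- A's in-flight t equals B's precomputed suffix value at every step
theorem pvLoop_agree (cs : List Char) : ∀ l ans,
    pvA_loop (pvSuffix cs).2 l ans cs = pvB_loop l ans (cs.zip (pvSuffix cs).1) := by
  induction cs with
  | nil => intro l ans; rfl
  | cons c rest ih =>
    intro l ans
    by_cases hL : c = 'L'
    · have hT : c ≠ 'T' := by simp [hL]
      simp only [pvSuffix, pvA_loop, pvB_loop, List.zip_cons_cons, if_pos hL, if_neg hT,
        ih, max_as_if]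
    · by_cases hT : c = 'T'
      · simp only [pvSuffix, pvA_loop, pvB_loop, List.zip_cons_cons, if_neg hL, if_pos hT,
          add_sub_cancel_right, ih, max_as_if]
      · simp only [pvSuffix, pvA_loop, pvB_loop, List.zip_cons_cons, if_neg hL, if_neg hT,
          ih, max_as_if]

-- Chars.count.go with a one-character needle counts that character
theorem count_go_T : ∀ (fuel : Nat) (s : List Char) (acc : Nat), s.length ≤ fuel →
    PySem.Chars.count.go ['T'] fuel s acc = acc + s.count 'T' := by
  intro fuel
  induction fuel with
  | zero =>
    intro s acc h
    have : s = [] := by cases s <;> simp_all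
    subst this; simp [PySem.Chars.count.go]
  | succ n ih =>
    intro s acc h
    cases s with
    | nil => simp [PySem.Chars.count.go]
    | cons c t =>
      simp only [PySem.Chars.count.go, List.isPrefixOf, List.count_cons]
      by_cases hc : c = 'T'
      · simp only [hc, beq_self_eq_true, Bool.and_true, if_pos]
        rw [show List.drop ['T'].length ('T' :: t) = t from rfl]
        rw [ih t (acc + 1) (by simpa using Nat.lt_succ_iff.mp (by simpa using h))]
        omega
      · have : (('T' : Char) == c) = false := by simp; exact fun e => hc e.symm
        simp only [this, Bool.false_and, if_neg Bool.false_ne_true]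
        rw [ih t acc (by simpa using Nat.lt_succ_iff.mp (by simpa using h))]
        simp [hc]

-- s.count('T') for the one-character needle is the character count
theorem str_count_T (s : String) : (PySem.Str.count s "T" : Int) = ((s.toList.count 'T' : Nat) : Int) := by
  have h : PySem.Chars.count s.toList ['T'] = s.toList.count 'T' := by
    unfold PySem.Chars.count
    simp only [List.isEmpty_cons, if_neg Bool.false_ne_true]
    simpa using count_go_T s.toList.length s.toList 0 le_rfl
  simp [PySem.Str.count_eq, h]

-- ===== VERDICT (by name: the statement is the Claim_ definition above) =====
theorem calcInsertC_spec : Claim_equal_calcInsertC := by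
  intro s _
  unfold Spec_calcInsertC calcInsertC calcInsertC_alt
  rw [str_count_T, ← pvSuffix_snd, pvLoop_agree]
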